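-- pv_equiv track=rewrite | github.com/JefGrailet/SAGE | Python/Distributions/NeighborhoodDegrees.py | getProjDegrees
-- ===== SOURCE A (Python) =====
-- def getProjDegrees(lines):
--     largestDegree = 0
--
--     # Does a first traversal to spot the largest degree
--     for i in range(0, len(lines)):
--         curDegree = lines[i].count(", ") + 1
--         if curDegree > largestDegree:
--             largestDegree = curDegree
--
--     if largestDegree == 0:
--         return None
--
--     res = []
--     for i in range(0, largestDegree):
--         res.append(0)
--
--     # Now records the degrees in the same format as getBipDegrees()
--     for i in range(0, len(lines)):
--         curDegree = lines[i].count(", ") + 1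
--         res[curDegree - 1] += 1
--
--     return res
-- ===== SOURCE B (Python) =====
-- def getProjDegrees(lines):
--     counts = {}
--     for line in lines:
--         deg = line.count(", ") + 1
--         counts[deg] = counts.get(deg, 0) + 1
--     if not counts:
--         return None
--     m = max(counts)
--     return [counts.get(d, 0) for d in range(1, m + 1)]
-- ===== Notes on version B (the rewrite author's own statement) =====
-- stated objective: simpler
-- what changed: B replaces A's two full passes over the lines (a running-max pass, then a zero-fill loop plus an indexed increment pass into a preallocated list) with a single pass building a degree->count dict, then emits counts.get(d,0) over range(1, max(keys)+1).
import Mathlib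
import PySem

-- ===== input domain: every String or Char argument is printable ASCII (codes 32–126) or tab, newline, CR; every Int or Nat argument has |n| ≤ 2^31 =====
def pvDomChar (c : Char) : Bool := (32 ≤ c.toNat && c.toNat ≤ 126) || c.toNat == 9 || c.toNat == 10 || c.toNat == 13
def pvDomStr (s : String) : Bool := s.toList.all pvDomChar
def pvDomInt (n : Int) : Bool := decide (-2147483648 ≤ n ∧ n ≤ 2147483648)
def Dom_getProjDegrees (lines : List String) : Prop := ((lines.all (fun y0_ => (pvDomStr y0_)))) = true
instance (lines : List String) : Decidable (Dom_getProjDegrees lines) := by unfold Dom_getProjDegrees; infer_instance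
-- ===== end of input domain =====

-- B builds one frequency dict over the lines and emits counts.get(d,0) over range(1, max+1),
-- replacing A's two passes over the lines and in-place list increments (objective: simpler).

-- ===== PORT A =====
def getProjDegrees (lines : List String) : Option (List Int) :=
  let largestDegree : Int :=
    (PySem.List.pyRange 0 lines.length 1).foldl (fun acc i =>
      let curDegree : Int := (PySem.Str.count (PySem.List.pyGetD lines i "") ", " : Int) + 1
      if curDegree > acc then curDegree else acc) 0
  if largestDegree = 0 then none
  else
    let res : List Int :=
      (PySem.List.pyRange 0 largestDegree 1).foldl (fun r _ => r ++ [(0 : Int)]) []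
    let res : List Int :=
      (PySem.List.pyRange 0 lines.length 1).foldl (fun r i =>
        let curDegree : Int := (PySem.Str.count (PySem.List.pyGetD lines i "") ", " : Int) + 1
        -- res[curDegree - 1] += 1 : the index is always in range (1 ≤ curDegree ≤ largestDegree)
        PySem.List.pySetD r (curDegree - 1) (PySem.List.pyGetD r (curDegree - 1) 0 + 1)) res
    some res

-- ===== PORT B =====
def getProjDegrees_alt (lines : List String) : Option (List Int) :=
  let counts : PySem.Dict Int Int :=
    lines.foldl (fun d line =>
      let deg : Int := (PySem.Str.count line ", " : Int) + 1
      d.insert deg (d.getD deg 0 + 1)) PySem.Dict.empty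
  if counts.size = 0 then none
  else
    match PySem.List.max? counts.keys (fun x => x) with
    | none => none   -- unreachable: counts is nonempty here
    | some m => some ((PySem.List.pyRange 1 (m + 1) 1).map (fun d => counts.getD d 0))

-- ===== PRECONDITION & SPEC =====
def Spec_getProjDegrees (lines : List String) (out : Option (List Int)) : Prop := out = getProjDegrees_alt lines
instance (lines : List String) (out : Option (List Int)) : Decidable (Spec_getProjDegrees lines out) := by unfold Spec_getProjDegrees; infer_instance

-- ===== CLAIM (what is proved, stated in full; the proofs are below) =====
def Claim_equal_getProjDegrees : Prop := ∀ (lines : List String), Dom_getProjDegrees lines → Spec_getProjDegrees lines (getProjDegrees lines)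

-- ===== LEMMAS AND PROOFS =====

-- degree of one line
def pvDeg (line : String) : Int := (PySem.Str.count line ", " : Int) + 1

-- the in-place increment of A's second pass
def pvInc (r : List Int) (d : Int) : List Int :=
  PySem.List.pySetD r (d - 1) (PySem.List.pyGetD r (d - 1) 0 + 1)

theorem pvDeg_pos (line : String) : 1 ≤ pvDeg line := by
  unfold pvDeg; omega

-- A's first loop is a running max over the degrees
theorem pvMax_loop (degs : List Int) (a : Int) :
    degs.foldl (fun acc d => if d > acc then d else acc) a = degs.foldl max a := by
  induction degs generalizing a with
  | nil => rfl
  | cons x t ih =>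
    simp only [List.foldl]
    rw [ih]
    congr 1
    omega

theorem pvFoldl_max_mem (degs : List Int) (a : Int) :
    degs.foldl max a ∈ degs ∨ degs.foldl max a = a := by
  induction degs generalizing a with
  | nil => simp
  | cons y t ih =>
    simp only [List.foldl]
    rcases ih (max a y) with h | h
    · exact Or.inl (List.mem_cons_of_mem _ h)
    · rcases max_choice a y with h' | h'
      · exact Or.inr (h.trans h')
      · exact Or.inl (by rw [h, h']; exact List.mem_cons_self)

-- appending one zero per iteration builds a zero list
theorem pvZeros_loop {α : Type} (l : List α) (init : List Int) :
    l.foldl (fun r _ => r ++ [(0 : Int)]) init = init ++ List.replicate l.length 0 := by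
  induction l generalizing init with
  | nil => simp
  | cons x t ih =>
    simp only [List.foldl_cons, ih, List.length_cons, List.replicate_succ,
      List.append_assoc, List.singleton_append]

theorem pvInc_len (degs : List Int) (res : List Int) :
    (degs.foldl pvInc res).length = res.length := by
  induction degs generalizing res with
  | nil => rfl
  | cons x t ih =>
    simp only [List.foldl]
    rw [ih, pvInc, PySem.List.length_pySetD]

-- A's counting loop, pointwise
theorem pvInc_loop (degs : List Int) (res : List Int)
    (h : ∀ d ∈ degs, 1 ≤ d ∧ d ≤ (res.length : Int)) :
    ∀ i : Nat, i < res.length →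
      (degs.foldl pvInc res).getD i 0 = res.getD i 0 + (degs.count ((i : Int) + 1) : Int) := by
  induction degs generalizing res with
  | nil => intro i hi; simp
  | cons x t ih =>
    intro i hi
    obtain ⟨hx1, hx2⟩ := h x List.mem_cons_self
    have hj : (x - 1).toNat < res.length := by omega
    have hres : pvInc res x
        = res.set (x - 1).toNat (PySem.List.pyGetD res (x - 1) 0 + 1) := by
      rw [pvInc, PySem.List.pySetD_of_nonneg res _ (by omega)]
    simp only [List.foldl]
    rw [ih (pvInc res x)
      (fun d hd => by
        have := h d (List.mem_cons_of_mem _ hd)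
        refine ⟨this.1, ?_⟩
        rw [hres, List.length_set]; exact this.2)
      i (by rw [hres, List.length_set]; exact hi)]
    rw [hres]
    have hget : PySem.List.pyGetD res (x - 1) 0 = res.getD (x - 1).toNat 0 := by
      rw [PySem.List.pyGetD_eq_getElem res _ (by omega) (by omega)]
      rw [List.getD_eq_getElem _ _ hj]
    by_cases hix : i = (x - 1).toNat
    · subst hix
      rw [List.getD_eq_getElem?_getD, List.getElem?_set_self, hget]
      have hx : ((((x - 1).toNat : Int)) + 1 = x) := by omega
      rw [hx, List.count_cons_self,
          List.getD_eq_getElem?_getD (l := res), List.getElem?_eq_getElem hj]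
      simp only [Option.getD_some]
      · push_cast
        ring
      · exact hj
    · rw [List.getD_eq_getElem?_getD, List.getElem?_set_ne (by omega : (x - 1).toNat ≠ i),
          ← List.getD_eq_getElem?_getD, List.count_cons]
      have : ¬ (x = (i : Int) + 1) := by omega
      simp [this]

-- every degree is ≤ the running max, and the running max over a nonempty list is a degree
theorem pvL_mem_and_max (degs : List Int) (hne : degs ≠ [])
    (hpos : ∀ d ∈ degs, 1 ≤ d) :
    (degs.foldl max 0) ∈ degs ∧ 1 ≤ degs.foldl max 0 ∧ ∀ d ∈ degs, d ≤ degs.foldl max 0 := by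
  have hub := (PySem.List.le_foldl_max degs 0).2
  rcases pvFoldl_max_mem degs 0 with h | h
  · exact ⟨h, hpos _ h, hub⟩
  · exfalso
    obtain ⟨d, hd⟩ := List.exists_mem_of_ne_nil degs hne
    have := hub d hd
    have := hpos d hd
    omega

-- the normal forms of the two ports
theorem portA_eq (lines : List String) :
    getProjDegrees lines =
      (if (lines.map pvDeg).foldl max 0 = 0 then none
       else some ((lines.map pvDeg).foldl pvInc
              (List.replicate ((lines.map pvDeg).foldl max 0).toNat 0))) := by
  simp only [getProjDegrees]
  rw [PySem.List.foldl_pyRange_zero_pyGetD' lines ""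
        (fun acc s => if ((PySem.Str.count s ", " : Int) + 1) > acc
                      then ((PySem.Str.count s ", " : Int) + 1) else acc) 0]
  rw [PySem.List.foldl_pyRange_zero_pyGetD' lines ""
        (fun r s => PySem.List.pySetD r ((PySem.Str.count s ", " : Int) + 1 - 1)
          (PySem.List.pyGetD r ((PySem.Str.count s ", " : Int) + 1 - 1) 0 + 1))]
  rw [← pvMax_loop, pvZeros_loop, PySem.List.length_pyRange_one]
  simp only [List.foldl_map, pvDeg, pvInc, Int.sub_zero, List.nil_append]

theorem portB_eq (lines : List String) :
    getProjDegrees_alt lines =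
      (if (PySem.Dict.counter (lines.map pvDeg)).size = 0 then none
       else
         match PySem.List.max? (PySem.Dict.counter (lines.map pvDeg)).keys (fun x => x) with
         | none => none
         | some m => some ((PySem.List.pyRange 1 (m + 1)).map
             (fun d => ((lines.map pvDeg).count d : Int)))) := by
  have hc : lines.foldl (fun d line =>
        PySem.Dict.insert d ((PySem.Str.count line ", " : Int) + 1)
          (d.getD ((PySem.Str.count line ", " : Int) + 1) 0 + 1)) PySem.Dict.empty
      = PySem.Dict.counter (lines.map pvDeg) := by
    rw [← PySem.Dict.foldl_insert_getD_add_one_eq_counter, List.foldl_map]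
    simp only [pvDeg]
  simp only [getProjDegrees_alt]
  rw [hc]
  split_ifs with h
  · rfl
  · have hfun : (fun d => (PySem.Dict.counter (lines.map pvDeg)).getD d 0)
        = (fun d => (((lines.map pvDeg).count d : Int))) :=
      funext (fun d => PySem.Dict.getD_counter _ _)
    rw [hfun]

theorem getProjDegrees_spec' (lines : List String) :
    getProjDegrees lines = getProjDegrees_alt lines := by
  rw [portA_eq, portB_eq]
  rcases eq_or_ne lines [] with rfl | hne
  · rfl
  set degs := lines.map pvDeg with hdegs
  have hdne : degs ≠ [] := by
    simp [hdegs, hne]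
  have hpos : ∀ d ∈ degs, 1 ≤ d := by
    intro d hd
    rw [hdegs] at hd
    obtain ⟨l, _, rfl⟩ := List.mem_map.mp hd
    exact pvDeg_pos l
  obtain ⟨hLmem, hL1, hLub⟩ := pvL_mem_and_max degs hdne hpos
  set L := degs.foldl max 0 with hL
  have hkeys : (PySem.Dict.counter degs).keys = PySem.Set.ofList degs :=
    PySem.Dict.keys_counter degs
  have hsz : (PySem.Dict.counter degs).size ≠ 0 := by
    intro h0
    have hkn : (PySem.Dict.counter degs).keys = [] := by
      unfold PySem.Dict.size at h0
      simp only [PySem.Dict.keys]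
      simp [List.length_eq_zero_iff.mp h0]
    rw [hkeys] at hkn
    obtain ⟨d, hd⟩ := List.exists_mem_of_ne_nil degs hdne
    have : d ∈ PySem.Set.ofList degs := (PySem.Set.mem_ofList _ _).mpr hd
    simp [hkn] at this
  rw [if_neg (by omega), if_neg hsz]
  rcases hmq : PySem.List.max? (PySem.Dict.counter degs).keys (fun x => x) with _ | m
  · exfalso
    have h0 := (PySem.List.max?_eq_none_iff _ _).mp hmq
    rw [hkeys] at h0
    obtain ⟨d, hd⟩ := List.exists_mem_of_ne_nil degs hdne
    have : d ∈ PySem.Set.ofList degs := (PySem.Set.mem_ofList _ _).mpr hd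
    simp [h0] at this
  · have hmdeg : m ∈ degs := by
      have := PySem.List.max?_mem hmq
      rw [hkeys] at this
      exact (PySem.Set.mem_ofList _ _).mp this
    have hmub : ∀ d ∈ degs, d ≤ m := by
      intro d hd
      have := PySem.List.max?_isMax hmq d (by rw [hkeys]; exact (PySem.Set.mem_ofList _ _).mpr hd)
      simpa using this
    have hmL : m = L := le_antisymm (hLub m hmdeg) (hmub L hLmem)
    simp only [hmL]
    refine congrArg some ?_
    refine List.ext_getElem ?_ ?_
    · rw [pvInc_len, List.length_replicate, List.length_map, PySem.List.length_pyRange_one]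
      omega
    · intro i h1 h2
      have hiL : i < L.toNat := by
        rw [pvInc_len, List.length_replicate] at h1; exact h1
      have hA : (degs.foldl pvInc (List.replicate L.toNat 0))[i]'h1
          = (degs.foldl pvInc (List.replicate L.toNat 0)).getD i 0 := by
        rw [List.getD_eq_getElem _ _ h1]
      rw [hA, pvInc_loop degs _ (fun d hd => ⟨hpos d hd, by
            have := hLub d hd
            simp only [List.length_replicate]
            omega⟩) i (by simpa using hiL)]
      rw [List.getD_replicate 0 hiL]
      simp only [List.getElem_map, PySem.List.getElem_pyRange_one]
      have h1i : (1 + (i : Int)) = (i : Int) + 1 := by omega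
      rw [h1i, zero_add]

-- ===== VERDICT (by name: the statement is the Claim_ definition above) =====
theorem getProjDegrees_spec : Claim_equal_getProjDegrees := by
  intro lines _
  exact getProjDegrees_spec' lines
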